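-- pv_equiv track=rewrite | github.com/UMNLibraries/experts_etl | experts_etl/oit_to_edw/affiliate_job.py | split_entries_into_stints
-- ===== SOURCE A (Python) =====
-- active_states = ['A']
--
-- def split_entries_into_stints(entries):
--     '''Because affiliate jobs have so little metadata, we have to do some extra
--     work to find cases where a person has started and left the same job
--     multiple times.
--     '''
--     if len(entries) == 0:
--         return []
--
--     stints = []
--     current_stint = []
--     current_stint_ending = False
--
--     for entry in entries:
--         if current_stint_ending:
--             if entry['status'] in active_states:
--                 # We've passed the end of the current stint, and this is a new stint in the same position.
--                 stints.append(current_stint)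
--                 current_stint = []
--                 current_stint_ending = False
--             current_stint.append(entry)
--             if entry['status_flg'] == 'C': # C is current.
--                 # Sometimes there are historical (H) entries with effdt's later than a C entry. Ignore them.
--                 break
--             else:
--                 continue
--
--         if entry['status'] not in active_states:
--             # This is the first entry with an inactive state for this stint, so it's ending.
--             # Other entries with inactive states may follow.
--             current_stint_ending = True
--         current_stint.append(entry)
--         if entry['status_flg'] == 'C': # C is current.
--             # Sometimes there are historical (H) entries with effdt's later than a C entry. Ignore them.
--             break
--         else:
--             continue
--
--     if len(current_stint) > 0:
--         stints.append(current_stint)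
--
--     return stints
-- ===== SOURCE B (Python) =====
-- active_states = ['A']
--
-- def split_entries_into_stints(entries):
--     # Working prefix: everything up to and including the first status_flg == 'C' entry.
--     prefix = []
--     for entry in entries:
--         prefix.append(entry)
--         if entry['status_flg'] == 'C':
--             break
--     # Repeatedly split off the next stint: the longest run that has no active
--     # entry occurring after an inactive one.
--     stints = []
--     rest = prefix
--     while rest:
--         seen_inactive = False
--         n = 0
--         for entry in rest:
--             active = entry['status'] in active_states
--             if active and seen_inactive:
--                 break
--             if not active:
--                 seen_inactive = True
--             n += 1
--         stints.append(rest[:n])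
--         rest = rest[n:]
--     return stints
-- ===== Notes on version B (the rewrite author's own statement) =====
-- stated objective: alternative
-- what changed: A's single append/break state machine over the whole list is replaced by a two-stage decomposition: first compute the working prefix (everything up to and including the first status_flg == 'C' entry), then repeatedly measure the length of the next stint and slice it off the front.
import Mathlib
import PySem

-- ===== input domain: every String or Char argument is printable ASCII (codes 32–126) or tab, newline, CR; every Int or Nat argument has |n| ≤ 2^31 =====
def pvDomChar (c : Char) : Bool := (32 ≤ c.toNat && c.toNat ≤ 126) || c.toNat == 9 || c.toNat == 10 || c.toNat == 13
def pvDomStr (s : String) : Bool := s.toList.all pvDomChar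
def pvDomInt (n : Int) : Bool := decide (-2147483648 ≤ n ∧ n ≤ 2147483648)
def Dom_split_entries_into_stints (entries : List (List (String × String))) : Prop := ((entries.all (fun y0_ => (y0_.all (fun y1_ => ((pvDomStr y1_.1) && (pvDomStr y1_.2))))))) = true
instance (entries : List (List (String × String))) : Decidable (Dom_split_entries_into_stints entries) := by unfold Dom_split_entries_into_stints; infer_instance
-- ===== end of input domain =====

-- B recomputes the same stints by a compute-prefix-then-repeatedly-split-off-the-next-stint
-- decomposition instead of A's single append/break state machine; objective: alternative.

-- ===== PORT A =====
-- active_states = ['A']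
def pvActiveStates : List String := ["A"]
-- entry['status'] / entry['status_flg']: first-match assoc lookup; the default "" is only
-- reached where Python raises KeyError (excluded by Pre_ below).
def pvStatus (e : List (String × String)) : String := (e.lookup "status").getD ""
def pvFlag (e : List (String × String)) : String := (e.lookup "status_flg").getD ""

-- the for-loop of A: state (stints, current_stint, current_stint_ending); 'break' = return state
def pvALoop : List (List (String × String)) → List (List (List (String × String))) →
    List (List (String × String)) → Bool →
    List (List (List (String × String))) × List (List (String × String))
  | [], stints, cur, _ => (stints, cur)
  | e :: rest, stints, cur, ending =>
    if ending then
      if pvActiveStates.contains (pvStatus e) then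
        if pvFlag e = "C" then (stints ++ [cur], [e])
        else pvALoop rest (stints ++ [cur]) [e] false
      else
        if pvFlag e = "C" then (stints, cur ++ [e])
        else pvALoop rest stints (cur ++ [e]) true
    else
      if pvFlag e = "C" then (stints, cur ++ [e])
      else pvALoop rest stints (cur ++ [e]) (!pvActiveStates.contains (pvStatus e))

def split_entries_into_stints (entries : List (List (String × String))) : List (List (List (String × String))) :=
  if entries.length = 0 then []
  else
    let r := pvALoop entries [] [] false
    if r.2.length > 0 then r.1 ++ [r.2] else r.1

-- ===== PORT B =====
-- working prefix: everything up to and including the first entry with status_flg == 'C'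
def pvPrefixB : List (List (String × String)) → List (List (String × String))
  | [] => []
  | e :: rest => if pvFlag e = "C" then [e] else e :: pvPrefixB rest

-- inner for-loop of B: length of the next stint of `rest`, given the seen_inactive flag
def pvStintLen : List (List (String × String)) → Bool → Nat
  | [], _ => 0
  | e :: rest, seen =>
    let a := pvActiveStates.contains (pvStatus e)
    if a && seen then 0
    else pvStintLen rest (seen || !a) + 1

-- needed for the termination of pvBLoop (the while-loop always consumes n ≥ 1 entries)
theorem pvStintLen_cons_false (e : List (String × String)) (tl : List (List (String × String))) :
    pvStintLen (e :: tl) false = pvStintLen tl (!pvActiveStates.contains (pvStatus e)) + 1 := by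
  simp [pvStintLen]

-- the while-loop of B: slice off rest[:n] (n ≥ 0, so the slice is take/drop) and continue on rest[n:]
def pvBLoop : List (List (String × String)) → List (List (List (String × String)))
  | [] => []
  | e :: tl =>
    let n := pvStintLen (e :: tl) false
    (e :: tl).take n :: pvBLoop ((e :: tl).drop n)
  termination_by l => l.length
  decreasing_by
    have h1 : 1 ≤ pvStintLen (e :: tl) false := by rw [pvStintLen_cons_false]; omega
    simp only [List.length_drop, List.length_cons]
    omega

def split_entries_into_stints_alt (entries : List (List (String × String))) : List (List (List (String × String))) :=
  pvBLoop (pvPrefixB entries)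

-- ===== PRECONDITION & SPEC =====
-- Pre_ excludes exactly the inputs where Python A raises KeyError: every entry up to and
-- including the first one whose status_flg is 'C' (the only entries either program reads)
-- must carry both a 'status' and a 'status_flg' key. Closed-form key-presence check; later
-- entries are unconstrained because neither program looks at them.
def pvPreCheck : List (List (String × String)) → Bool
  | [] => true
  | e :: rest =>
    (e.lookup "status").isSome &&
    match e.lookup "status_flg" with
    | none => false
    | some f => (f == "C") || pvPreCheck rest

def Pre_split_entries_into_stints (entries : List (List (String × String))) : Prop :=
  pvPreCheck entries = true
instance (entries : List (List (String × String))) : Decidable (Pre_split_entries_into_stints entries) := by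
  unfold Pre_split_entries_into_stints; infer_instance

def pvWitness_split_entries_into_stints : (List (List (String × String))) :=
  [[("status", "A"), ("status_flg", "H")], [("status", "I"), ("status_flg", "C")]]

def Spec_split_entries_into_stints (entries : List (List (String × String))) (out : List (List (List (String × String)))) : Prop := out = split_entries_into_stints_alt entries
instance (entries : List (List (String × String))) (out : List (List (List (String × String)))) : Decidable (Spec_split_entries_into_stints entries out) := by unfold Spec_split_entries_into_stints; infer_instance

-- ===== CLAIM (what is proved, stated in full; the proofs are below) =====
def Claim_equal_split_entries_into_stints : Prop := ∀ (entries : List (List (String × String))), Dom_split_entries_into_stints entries → Pre_split_entries_into_stints entries → Spec_split_entries_into_stints entries (split_entries_into_stints entries)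

-- ===== LEMMAS AND PROOFS =====

-- A's loop with the 'C'-break removed: it processes the whole list it is given.
def pvCore : List (List (String × String)) → List (List (List (String × String))) →
    List (List (String × String)) → Bool →
    List (List (List (String × String))) × List (List (String × String))
  | [], stints, cur, _ => (stints, cur)
  | e :: rest, stints, cur, ending =>
    if ending then
      if pvActiveStates.contains (pvStatus e) then pvCore rest (stints ++ [cur]) [e] false
      else pvCore rest stints (cur ++ [e]) true
    else pvCore rest stints (cur ++ [e]) (!pvActiveStates.contains (pvStatus e))

-- finalization of A's state, as in A's last lines
def pvFin (r : List (List (List (String × String))) × List (List (String × String))) :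
    List (List (List (String × String))) :=
  if r.2.length > 0 then r.1 ++ [r.2] else r.1

-- canonical grouping of a list given the seen-inactive flag; the head group is the
-- continuation of the group under construction
def pvAttachHead (e : List (String × String)) :
    List (List (List (String × String))) → List (List (List (String × String)))
  | [] => [[e]]
  | g :: gs => (e :: g) :: gs

def pvCanon : List (List (String × String)) → Bool → List (List (List (String × String)))
  | [], _ => []
  | e :: rest, seen =>
    let a := pvActiveStates.contains (pvStatus e)
    if a && seen then [] :: pvAttachHead e (pvCanon rest false)
    else pvAttachHead e (pvCanon rest (seen || !a))

def pvAttach (cur : List (List (String × String))) :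
    List (List (List (String × String))) → List (List (List (String × String)))
  | [] => if cur.length > 0 then [cur] else []
  | g :: gs => (cur ++ g) :: gs

theorem pvAttach_nil (gs : List (List (List (String × String)))) : pvAttach [] gs = gs := by
  cases gs <;> simp [pvAttach]

-- A's loop with the break equals the break-free loop on the working prefix
theorem pvALoop_eq_core (l : List (List (String × String)))
    (st : List (List (List (String × String)))) (cur : List (List (String × String))) (ending : Bool) :
    pvALoop l st cur ending = pvCore (pvPrefixB l) st cur ending := by
  induction l generalizing st cur ending with
  | nil => simp [pvPrefixB, pvALoop, pvCore]
  | cons e rest ih =>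
    by_cases hc : pvFlag e = "C" <;>
      cases ending <;>
        by_cases ha : pvStatus e ∈ pvActiveStates <;>
          simp_all [pvPrefixB, pvALoop, pvCore]

-- finalized break-free loop = accumulated stints ++ canonical grouping attached to cur
theorem pvFin_core (l : List (List (String × String)))
    (st : List (List (List (String × String)))) (cur : List (List (String × String))) (ending : Bool) :
    pvFin (pvCore l st cur ending) = st ++ pvAttach cur (pvCanon l ending) := by
  induction l generalizing st cur ending with
  | nil =>
    cases cur <;> simp [pvCore, pvFin, pvAttach, pvCanon]
  | cons e rest ih =>
    cases ending
    · by_cases ha : pvStatus e ∈ pvActiveStates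
      · simp [pvCore, pvCanon, pvAttach, ha, ih]
        cases pvCanon rest false <;> simp [pvAttachHead]
      · simp [pvCore, pvCanon, pvAttach, ha, ih]
        cases pvCanon rest true <;> simp [pvAttachHead]
    · by_cases ha : pvStatus e ∈ pvActiveStates
      · simp [pvCore, pvCanon, pvAttach, ha, ih]
        cases pvCanon rest false <;> simp [pvAttachHead]
      · simp [pvCore, pvCanon, pvAttach, ha, ih]
        cases pvCanon rest true <;> simp [pvAttachHead]

-- the canonical grouping splits at pvStintLen
theorem pvCanon_split (l : List (List (String × String))) (seen : Bool) (h : l ≠ []) :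
    pvCanon l seen =
      l.take (pvStintLen l seen) :: pvCanon (l.drop (pvStintLen l seen)) false := by
  induction l generalizing seen with
  | nil => exact absurd rfl h
  | cons e rest ih =>
    by_cases ha : pvStatus e ∈ pvActiveStates
    · cases seen
      · by_cases hr : rest = []
        · subst hr; simp [pvCanon, pvStintLen, ha, pvAttachHead]
        · simp only [pvCanon, pvStintLen, List.contains_eq_mem, ha, decide_true,
            Bool.and_false, Bool.false_eq_true, if_false, Bool.false_or, Bool.not_true,
            List.take_succ_cons, List.drop_succ_cons]
          rw [ih false hr]
          simp [pvAttachHead]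
      · simp [pvCanon, pvStintLen, ha]
    · by_cases hr : rest = []
      · subst hr; simp [pvCanon, pvStintLen, ha, pvAttachHead]
      · simp only [pvCanon, pvStintLen, List.contains_eq_mem, ha, decide_false,
          Bool.false_and, Bool.false_eq_true, if_false, Bool.not_false, Bool.or_true,
          List.take_succ_cons, List.drop_succ_cons]
        rw [ih true hr]
        simp [pvAttachHead]

-- B's while-loop computes the canonical grouping with flag false
theorem pvBLoop_eq_canon (l : List (List (String × String))) : pvBLoop l = pvCanon l false := by
  induction l using pvBLoop.induct with
  | case1 => simp [pvBLoop, pvCanon]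
  | case2 e tl n ih =>
    rw [pvBLoop]
    rw [pvCanon_split (e :: tl) false (by simp)]
    rw [ih]

-- ===== VERDICT (by name: the statement is the Claim_ definition above) =====
theorem split_entries_into_stints_spec : Claim_equal_split_entries_into_stints := by
  intro entries _ _
  unfold Spec_split_entries_into_stints
  cases entries with
  | nil => simp [split_entries_into_stints, split_entries_into_stints_alt, pvPrefixB, pvBLoop]
  | cons e rest =>
    show split_entries_into_stints (e :: rest) = split_entries_into_stints_alt (e :: rest)
    unfold split_entries_into_stints split_entries_into_stints_alt
    simp only [List.length_cons, Nat.succ_ne_zero, if_false]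
    have h1 : (if (pvALoop (e :: rest) [] [] false).2.length > 0
        then (pvALoop (e :: rest) [] [] false).1 ++ [(pvALoop (e :: rest) [] [] false).2]
        else (pvALoop (e :: rest) [] [] false).1) = pvFin (pvALoop (e :: rest) [] [] false) := rfl
    rw [h1, pvALoop_eq_core, pvFin_core, pvBLoop_eq_canon, pvAttach_nil, List.nil_append]
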